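-- pv_equiv track=rewrite | github.com/Tuannnk/ToanRoiRac | quine.py | can_combine
-- ===== SOURCE A (Python) =====
-- from typing import List, Set, Tuple, Dict
-- from typing import List, Tuple
--
-- def can_combine(a: str, b: str) -> Tuple[bool, str]:
--     """Kiểm tra có thể ghép 2 mẫu a và b hay không.
--     Chỉ ghép được nếu khác nhau đúng 1 vị trí (0/1) và không liên quan tới '-'.
--     """
--     diff = 0
--     out = []
--     for x, y in zip(a, b):
--         if x == y:
--             out.append(x)
--         else:
--             if x == '-' or y == '-':
--                 return False, ''  # nếu có '-' thì không ghép
--             diff += 1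
--             out.append('-')
--             if diff > 1:
--                 return False, ''
--     return (diff == 1, ''.join(out))
-- ===== SOURCE B (Python) =====
-- def can_combine(a: str, b: str):
--     """Gather all mismatch positions in one pass, then decide by their count."""
--     m = min(len(a), len(b))
--     diffs = [(i, x, y) for i, (x, y) in enumerate(zip(a, b)) if x != y]
--     if not diffs:
--         return (False, a[:m])
--     if len(diffs) == 1:
--         i, x, y = diffs[0]
--         if x != '-' and y != '-':
--             return (True, a[:i] + '-' + a[i + 1:m])
--     return (False, '')
-- ===== Notes on version B (the rewrite author's own statement) =====
-- stated objective: alternative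
-- what changed: B gathers all mismatch positions in one comprehension pass and decides by their count, building the merged pattern by slicing a instead of A's inline accumulator with early exits.
import Mathlib
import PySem

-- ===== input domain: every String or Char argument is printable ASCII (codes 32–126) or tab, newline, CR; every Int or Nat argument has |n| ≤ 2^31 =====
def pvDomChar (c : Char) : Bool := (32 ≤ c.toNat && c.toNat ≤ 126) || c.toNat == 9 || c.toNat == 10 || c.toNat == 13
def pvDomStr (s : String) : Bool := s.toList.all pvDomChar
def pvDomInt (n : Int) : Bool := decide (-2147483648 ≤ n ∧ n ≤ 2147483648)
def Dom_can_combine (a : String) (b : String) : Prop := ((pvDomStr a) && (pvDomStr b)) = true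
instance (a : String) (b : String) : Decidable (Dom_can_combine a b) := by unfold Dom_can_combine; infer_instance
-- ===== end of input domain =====

-- B collects the mismatch positions in one pass and decides by their count; A uses an
-- inline accumulator with early exits.  Equivalence of the return values is proved on all inputs.

-- ===== PORT A =====
-- the for-loop over zip(a, b) with state (diff, out) and early returns
def canCombineLoop : List (Char × Char) → Nat → List Char → Bool × String
  | [], diff, out => (decide (diff = 1), String.mk out)
  | (x, y) :: rest, diff, out =>
    if x = y then canCombineLoop rest diff (out ++ [x])
    else if x = '-' ∨ y = '-' then (false, "")
    else if diff + 1 > 1 then (false, "")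
    else canCombineLoop rest (diff + 1) (out ++ ['-'])

def can_combine (a : String) (b : String) : Bool × String :=
  canCombineLoop (a.toList.zip b.toList) 0 []

-- ===== PORT B =====
def can_combine_alt (a : String) (b : String) : Bool × String :=
  let la := a.toList
  let lb := b.toList
  let m : Int := min (la.length : Int) (lb.length : Int)
  let diffs := (PySem.List.enumerate (la.zip lb)).filter (fun p => p.2.1 != p.2.2)
  match diffs with
  | [] => (false, String.mk (PySem.List.slice la none (some m)))
  | [(i, x, y)] =>
      if x ≠ '-' ∧ y ≠ '-' then
        (true, String.mk (PySem.List.slice la none (some i) ++ ['-'] ++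
                          PySem.List.slice la (some (i + 1)) (some m)))
      else (false, "")
  | _ => (false, "")

-- ===== PRECONDITION & SPEC =====
def Spec_can_combine (a : String) (b : String) (out : Bool × String) : Prop := out = can_combine_alt a b
instance (a : String) (b : String) (out : Bool × String) : Decidable (Spec_can_combine a b out) := by unfold Spec_can_combine; infer_instance

-- ===== CLAIM (what is proved, stated in full; the proofs are below) =====
def Claim_equal_can_combine : Prop := ∀ (a : String) (b : String), Dom_can_combine a b → Spec_can_combine a b (can_combine a b)

-- ===== LEMMAS AND PROOFS =====

theorem filter_enum_nil_iff (l : List (Char × Char)) (s : Int) :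
    ((PySem.List.enumerate l s).filter (fun p => p.2.1 != p.2.2) = []) ↔
      l.all (fun p => p.1 == p.2) := by
  induction l generalizing s with
  | nil => simp [PySem.List.enumerate_nil]
  | cons hd tl ih =>
    obtain ⟨x, y⟩ := hd
    by_cases h : x = y <;>
      simp [PySem.List.enumerate_cons, h, ih (s + 1)]

theorem loop_one (l : List (Char × Char)) (acc : List Char) :
    canCombineLoop l 1 acc =
      if l.all (fun p => p.1 == p.2) then (true, String.mk (acc ++ l.map Prod.fst))
      else (false, "") := by
  induction l generalizing acc with
  | nil => simp [canCombineLoop]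
  | cons hd tl ih =>
    obtain ⟨x, y⟩ := hd
    by_cases h : x = y
    · simp [canCombineLoop, h, ih]
    · simp [canCombineLoop, h]

theorem loop_zero (l : List (Char × Char)) (s : Int) (acc : List Char) :
    canCombineLoop l 0 acc =
      (match (PySem.List.enumerate l s).filter (fun p => p.2.1 != p.2.2) with
       | [] => (false, String.mk (acc ++ l.map Prod.fst))
       | [(i, x, y)] =>
           if x ≠ '-' ∧ y ≠ '-' then
             (true, String.mk (acc ++ (l.map Prod.fst).take (i - s).toNat ++
                               '-' :: (l.map Prod.fst).drop ((i - s).toNat + 1)))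
           else (false, "")
       | _ => (false, "")) := by
  induction l generalizing s acc with
  | nil => simp [canCombineLoop, PySem.List.enumerate_nil]
  | cons hd tl ih =>
    obtain ⟨x, y⟩ := hd
    rw [PySem.List.enumerate_cons, List.filter_cons]
    by_cases h : x = y
    · -- equal characters: the pair is filtered out, indices in the tail are ≥ s + 1
      subst h
      simp only [bne_self_eq_false, Bool.false_eq_true, if_false]
      rw [canCombineLoop]
      rw [ih (s + 1) (acc ++ [x])]
      rcases hf : (PySem.List.enumerate tl (s + 1)).filter (fun p => p.2.1 != p.2.2) with
        _ | ⟨⟨i, x', y'⟩, rest⟩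
      · rw [hf]; simp
      · rcases rest with _ | ⟨p2, rest2⟩
        · -- single mismatch in the tail, at index i = (s+1) + k
          have hmem : (i, x', y') ∈ PySem.List.enumerate tl (s + 1) := by
            have hs := List.filter_sublist (l := PySem.List.enumerate tl (s + 1))
              (p := fun p => p.2.1 != p.2.2)
            rw [hf] at hs
            exact hs.subset (by simp)
          obtain ⟨k, hk, hpk⟩ := (PySem.List.mem_enumerate_iff _ _ _).1 hmem
          have hi : i = s + 1 + k := by
            have h2 := congrArg Prod.fst hpk; simpa using h2
          have h1 : (i - s).toNat = (i - (s + 1)).toNat + 1 := by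
            subst hi; omega
          rw [hf]
          simp [h1]
        · rw [hf]; simp
    · -- mismatching head: it stays at the head of the filtered list
      have hb : ((fun (p : Int × Char × Char) => p.2.1 != p.2.2) (s, x, y)) = true := by
        simp [h]
      simp only [hb, if_true]
      rw [canCombineLoop]
      simp only [h, if_false]
      by_cases hd2 : x = '-' ∨ y = '-'
      · simp only [hd2, if_true]
        rcases hf : (PySem.List.enumerate tl (s + 1)).filter (fun p => p.2.1 != p.2.2) with
          _ | ⟨p1, rest⟩
        · have hcond : ¬ (x ≠ '-' ∧ y ≠ '-') := by tauto
          rw [hf]; simp [hcond]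
        · rw [hf]
      · simp only [hd2, if_false]
        have h11 : ¬ (0 + 1 > 1) := by omega
        simp only [h11, if_false]
        rw [loop_one]
        rcases hf : (PySem.List.enumerate tl (s + 1)).filter (fun p => p.2.1 != p.2.2) with
          _ | ⟨p1, rest⟩
        · have htl : tl.all (fun p => p.1 == p.2) := (filter_enum_nil_iff tl (s + 1)).1 hf
          have hcond : x ≠ '-' ∧ y ≠ '-' := by tauto
          rw [hf]; simp [htl, hcond]
        · have htl : ¬ tl.all (fun p => p.1 == p.2) := by
            intro hall
            rw [← filter_enum_nil_iff tl (s + 1)] at hall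
            rw [hf] at hall; exact List.cons_ne_nil _ _ hall
          rcases rest with _ | ⟨p2, rest2⟩ <;> rw [hf] <;> simp [htl]

-- map Prod.fst of a zip is the first list truncated to the common length
theorem map_fst_zip_take {α β : Type} (la : List α) (lb : List β) :
    (la.zip lb).map Prod.fst = la.take (min la.length lb.length) := by
  induction la generalizing lb with
  | nil => simp
  | cons x xs ih =>
    cases lb with
    | nil => simp
    | cons y ys => simp [List.zip_cons_cons, ih, Nat.succ_min_succ]

-- ===== VERDICT (by name: the statement is the Claim_ definition above) =====
theorem can_combine_spec : Claim_equal_can_combine := by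
  intro a b _
  unfold Spec_can_combine can_combine can_combine_alt
  set la := a.toList with hla
  set lb := b.toList with hlb
  set mN : Nat := min la.length lb.length with hmN
  have hmin : min (la.length : Int) (lb.length : Int) = (mN : Int) := by
    simp [hmN]
  have hfst : (la.zip lb).map Prod.fst = la.take mN := map_fst_zip_take la lb
  have hlen : (la.zip lb).length = mN := by simp [hmN]
  rw [loop_zero (la.zip lb) 0 []]
  simp only [hmin]
  rcases hf : (PySem.List.enumerate (la.zip lb) 0).filter (fun p => p.2.1 != p.2.2) with
    _ | ⟨⟨i, x, y⟩, rest⟩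
  · rw [hf]
    simp [hfst, PySem.List.slice_to_natCast]
  · rcases rest with _ | ⟨p2, rest2⟩
    · have hmem : (i, x, y) ∈ PySem.List.enumerate (la.zip lb) 0 := by
        have hs := List.filter_sublist (l := PySem.List.enumerate (la.zip lb) 0)
          (p := fun p => p.2.1 != p.2.2)
        rw [hf] at hs
        exact hs.subset (by simp)
      obtain ⟨k, hk, hpk⟩ := (PySem.List.mem_enumerate_iff _ _ _).1 hmem
      have hi : i = (k : Int) := by
        have h2 := congrArg Prod.fst hpk; simpa using h2
      rw [hlen] at hk
      subst hi
      have htoNat : (((k : Int)) - 0).toNat = k := by omega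
      have hslice1 : PySem.List.slice la none (some (k : Int)) = la.take k :=
        PySem.List.slice_to_natCast la k
      have hslice2 : PySem.List.slice la (some ((k : Int) + 1)) (some (mN : Int)) =
          (la.drop (k + 1)).take (mN - (k + 1)) := by
        have h2 := PySem.List.slice_natCast la (k + 1) mN
        simpa using h2
      have htake : (la.take mN).take k = la.take k := by
        rw [List.take_take]; congr 1; omega
      have hdrop : (la.take mN).drop (k + 1) = (la.drop (k + 1)).take (mN - (k + 1)) := by
        rw [List.drop_take]
      rw [hf]
      have hmin2 : min k mN = k := by omega
      simp [hfst, hslice1, hslice2, List.take_take, List.drop_take, hmin2]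
    · rw [hf]
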